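-- pv_equiv track=rewrite | github.com/fengxuebailu/Tetris.js | Tetris.py | get_bumpiness
-- ===== SOURCE A (Python) =====
-- def get_bumpiness(board):
--     """计算表面平整度"""
--     heights = []
--     for j in range(len(board[0])):
--         for i in range(len(board)):
--             if board[i][j]:
--                 heights.append(len(board) - i)
--                 break
--         else:
--             heights.append(0)
--
--     bumpiness = 0
--     for i in range(len(heights) - 1):
--         bumpiness += abs(heights[i] - heights[i + 1])
--     return bumpiness
-- ===== SOURCE B (Python) =====
-- def get_bumpiness(board):
--     """计算表面平整度 — bottom-up row sweep: overwrite per-column heights over the whole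
--     board (no per-column first-hit search), then sum zipped adjacent differences."""
--     heights = [0] * len(board[0])
--     for d, row in enumerate(reversed(board), 1):
--         heights = [d if row[j] else h for j, h in enumerate(heights)]
--     return sum(abs(a - b) for a, b in zip(heights, heights[1:]))
-- ===== Notes on version B (the rewrite author's own statement) =====
-- stated objective: alternative
-- what changed: B never searches a column for its first filled cell: it sweeps the rows bottom-up, overwriting a per-column heights array at every filled cell (last write, i.e. the topmost row, wins), then sums zipped adjacent absolute differences; A scans each column top-down with break/else to build a heights list and then runs an index loop over adjacent pairs.
-- outside the precondition, e.g. on get_bumpiness([[1, 2], [3]]): A returns 0, B raises IndexError; on get_bumpiness([]): A raises IndexError, B raises IndexError; on get_bumpiness([[0, 0], [3]]): A raises IndexError, B raises IndexError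
import Mathlib
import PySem

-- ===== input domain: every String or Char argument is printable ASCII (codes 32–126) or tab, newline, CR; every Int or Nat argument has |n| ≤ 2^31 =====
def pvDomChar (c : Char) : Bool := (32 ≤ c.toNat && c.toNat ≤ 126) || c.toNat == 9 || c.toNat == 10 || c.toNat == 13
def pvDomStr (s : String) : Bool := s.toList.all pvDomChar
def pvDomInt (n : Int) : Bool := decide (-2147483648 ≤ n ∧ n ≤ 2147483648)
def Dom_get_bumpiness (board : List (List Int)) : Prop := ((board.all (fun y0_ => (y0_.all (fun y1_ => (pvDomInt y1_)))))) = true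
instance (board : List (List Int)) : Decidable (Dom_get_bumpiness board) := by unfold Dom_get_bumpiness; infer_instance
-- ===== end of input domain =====

-- B replaces A's per-column first-filled-cell search by a bottom-up whole-board row sweep
-- that overwrites a per-column heights array (topmost write wins), then sums zipped adjacent
-- differences; objective: alternative (same cost, different traversal).

-- ===== PORT A =====
-- inner 'for i in range(len(board)): if board[i][j]: append(len(board)-i); break / else: append(0)'
-- (structural recursion over the rows carrying the index i; cell read is board[i][j], in range under Pre_)
def pvColHeightA (n : Int) (j : Int) : List (List Int) → Int → Int
  | [], _ => 0
  | row :: rest, i =>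
      if ((PySem.List.pyGet? row j).getD 0) ≠ 0 then n - i else pvColHeightA n j rest (i + 1)

-- 'for i in range(len(heights)-1): bumpiness += abs(heights[i]-heights[i+1])' (adjacent-pair recursion, left accumulator)
def pvBumpA : List Int → Int → Int
  | a :: b :: rest, acc => pvBumpA (b :: rest) (acc + |a - b|)
  | _, acc => acc

def get_bumpiness (board : List (List Int)) : Int :=
  let heights :=
    (PySem.List.pyRange 0 (((PySem.List.pyGet? board 0).getD []).length : Int) 1).foldl
      (fun acc j => acc ++ [pvColHeightA board.length j board 0]) []
  pvBumpA heights 0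

-- ===== PORT B =====
-- '[d if row[j] else h for j, h in enumerate(heights)]'
def pvSweepStep (row : List Int) (d : Int) (heights : List Int) : List Int :=
  (PySem.List.enumerate heights 0).map
    (fun jh => if ((PySem.List.pyGet? row jh.1).getD 0) ≠ 0 then d else jh.2)

-- 'for d, row in enumerate(reversed(board), 1): heights = …' (called on board.reverse with d = 1)
def pvSweep : List (List Int) → Int → List Int → List Int
  | [], _, heights => heights
  | row :: rest, d, heights => pvSweep rest (d + 1) (pvSweepStep row d heights)

def get_bumpiness_alt (board : List (List Int)) : Int :=
  let heights :=
    pvSweep board.reverse 1 (List.replicate ((PySem.List.pyGet? board 0).getD []).length 0)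
  -- 'sum(abs(a - b) for a, b in zip(heights, heights[1:]))'; heights[1:] is PySem.List.slice
  ((heights.zip (PySem.List.slice heights (some 1) none)).map (fun p => |p.1 - p.2|)).sum

-- ===== PRECONDITION & SPEC =====
-- Pre_ excludes the empty board (A raises IndexError on board[0]) and ragged boards where some row is
-- shorter than the first row: there reading a cell board[i][j] can raise IndexError (A raises unless a
-- filled cell happens to stop each column scan early; B reads every cell and raises).
def Pre_get_bumpiness (board : List (List Int)) : Prop :=
  board ≠ [] ∧ ∀ row ∈ board, (board.headD []).length ≤ row.length
instance (board : List (List Int)) : Decidable (Pre_get_bumpiness board) := by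
  unfold Pre_get_bumpiness; infer_instance
def pvWitness_get_bumpiness : List (List Int) := [[0, 1, 0], [1, 0, 0], [1, 1, 0]]
def Spec_get_bumpiness (board : List (List Int)) (out : Int) : Prop := out = get_bumpiness_alt board
instance (board : List (List Int)) (out : Int) : Decidable (Spec_get_bumpiness board out) := by unfold Spec_get_bumpiness; infer_instance

-- ===== CLAIM (what is proved, stated in full; the proofs are below) =====
def Claim_equal_get_bumpiness : Prop := ∀ (board : List (List Int)), Dom_get_bumpiness board → Pre_get_bumpiness board → Spec_get_bumpiness board (get_bumpiness board)

-- ===== LEMMAS AND PROOFS =====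

-- what the sweep does to one fixed column index i, rows processed in the given order
def pvColApply : List (List Int) → Int → Int → Int → Int
  | [], _, _, h => h
  | row :: rest, d, j, h =>
      pvColApply rest (d + 1) j (if ((PySem.List.pyGet? row j).getD 0) ≠ 0 then d else h)

theorem pvSweepStep_getElem? (row : List Int) (d : Int) (hs : List Int) (i : Nat) :
    (pvSweepStep row d hs)[i]? =
      hs[i]?.map (fun h => if ((PySem.List.pyGet? row (i : Int)).getD 0) ≠ 0 then d else h) := by
  simp only [pvSweepStep, List.getElem?_map, PySem.List.getElem?_enumerate]
  cases hs[i]? <;> simp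

theorem pvSweep_getElem? (rs : List (List Int)) (d : Int) (hs : List Int) (i : Nat) :
    (pvSweep rs d hs)[i]? = hs[i]?.map (fun h => pvColApply rs d (i : Int) h) := by
  induction rs generalizing d hs with
  | nil => simp [pvSweep, pvColApply]
  | cons row rest ih =>
      rw [pvSweep, ih, pvSweepStep_getElem?]
      cases hs[i]? <;> simp [pvColApply]

theorem pvColHeightA_shift (rs : List (List Int)) (n j i c : Int) :
    pvColHeightA (n + c) j rs (i + c) = pvColHeightA n j rs i := by
  induction rs generalizing i with
  | nil => rfl
  | cons row rest ih =>
      simp only [pvColHeightA]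
      rw [show i + c + 1 = (i + 1) + c by ring, ih]
      split <;> [omega; rfl]

theorem pvColApply_append (rs : List (List Int)) (row : List Int) (d j h : Int) :
    pvColApply (rs ++ [row]) d j h =
      if ((PySem.List.pyGet? row j).getD 0) ≠ 0 then d + rs.length
      else pvColApply rs d j h := by
  induction rs generalizing d h with
  | nil => simp [pvColApply]
  | cons r rest ih =>
      simp only [List.cons_append, pvColApply, ih]
      split
      · simp only [List.length_cons]; push_cast; ring
      · rfl

theorem pvColApply_reverse (board : List (List Int)) (j : Int) :
    pvColApply board.reverse 1 j 0 = pvColHeightA board.length j board 0 := by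
  induction board with
  | nil => rfl
  | cons row rest ih =>
      rw [List.reverse_cons, pvColApply_append, ih]
      have hshift : pvColHeightA ((rest.length : Int) + 1) j rest (0 + 1) =
          pvColHeightA (rest.length : Int) j rest 0 :=
        pvColHeightA_shift rest (rest.length : Int) j 0 1
      simp only [pvColHeightA, List.length_cons, List.length_reverse]
      norm_num at hshift
      push_cast
      rw [hshift]
      split
      · ring
      · rfl

theorem pvFoldlApp (f : Int → Int) (js : List Int) (acc : List Int) :
    js.foldl (fun acc j => acc ++ [f j]) acc = acc ++ js.map f := by
  induction js generalizing acc with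
  | nil => simp
  | cons j rest ih => simp [List.foldl, ih]

-- the two height lists coincide
theorem pvHeights_eq (board : List (List Int)) :
    (PySem.List.pyRange 0 (((PySem.List.pyGet? board 0).getD []).length : Int) 1).map
        (fun j => pvColHeightA board.length j board 0)
      = pvSweep board.reverse 1
          (List.replicate ((PySem.List.pyGet? board 0).getD []).length 0) := by
  apply List.ext_getElem?
  intro i
  rw [pvSweep_getElem?]
  by_cases hi : i < ((PySem.List.pyGet? board 0).getD []).length
  · rw [PySem.List.getElem?_map_pyRange_zero _ _ _ hi]
    rw [List.getElem?_replicate, if_pos hi]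
    simp [pvColApply_reverse]
  · rw [List.getElem?_eq_none, List.getElem?_eq_none] <;>
      simp [PySem.List.length_pyRange_one, Nat.le_of_not_lt (by exact hi)]

theorem pvBumpA_sum : ∀ (hs : List Int) (acc : Int),
    pvBumpA hs acc = acc + ((hs.zip hs.tail).map (fun p => |p.1 - p.2|)).sum
  | [], acc => by simp [pvBumpA]
  | [a], acc => by simp [pvBumpA]
  | a :: b :: rest, acc => by
      rw [pvBumpA, pvBumpA_sum (b :: rest) (acc + |a - b|)]
      simp [List.zip]
      ring

-- ===== VERDICT (by name: the statement is the Claim_ definition above) =====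
theorem get_bumpiness_spec : Claim_equal_get_bumpiness := by
  intro board _ _
  unfold Spec_get_bumpiness get_bumpiness get_bumpiness_alt
  dsimp only
  rw [pvFoldlApp, pvBumpA_sum, pvHeights_eq, PySem.List.slice_from_one]
  simp
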